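-- pv_equiv track=rewrite | github.com/Demadunk/endless-war | ewutils.py | getIntToken
-- ===== SOURCE A (Python) =====
-- def getIntToken(tokens=[], allow_all=False):
-- 	value = None
--
-- 	for token in tokens[1:]:
-- 		try:
-- 			value = int(token)
-- 			if value < 0:
-- 				value = None
-- 			break
-- 		except:
-- 			if allow_all and ("{}".format(token)).lower() == 'all':
-- 				value = -1
-- 			else:
-- 				value = None
--
-- 	return value
-- ===== SOURCE B (Python) =====
-- def getIntToken(tokens=[], allow_all=False):
-- 	rest = tokens[1:]
-- 	for token in rest:
-- 		try:
-- 			v = int(token)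
-- 		except ValueError:
-- 			continue
-- 		return v if v >= 0 else None
-- 	if allow_all and rest and rest[-1].lower() == 'all':
-- 		return -1
-- 	return None
-- ===== Notes on version B (the rewrite author's own statement) =====
-- stated objective: simpler
-- what changed: Replaces A's overwrite-every-iteration accumulator (where 'all' and None are rewritten on each failing token) with an early-return scan for the first parseable int plus one separate check of the last token for 'all' after the loop.
import Mathlib
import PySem

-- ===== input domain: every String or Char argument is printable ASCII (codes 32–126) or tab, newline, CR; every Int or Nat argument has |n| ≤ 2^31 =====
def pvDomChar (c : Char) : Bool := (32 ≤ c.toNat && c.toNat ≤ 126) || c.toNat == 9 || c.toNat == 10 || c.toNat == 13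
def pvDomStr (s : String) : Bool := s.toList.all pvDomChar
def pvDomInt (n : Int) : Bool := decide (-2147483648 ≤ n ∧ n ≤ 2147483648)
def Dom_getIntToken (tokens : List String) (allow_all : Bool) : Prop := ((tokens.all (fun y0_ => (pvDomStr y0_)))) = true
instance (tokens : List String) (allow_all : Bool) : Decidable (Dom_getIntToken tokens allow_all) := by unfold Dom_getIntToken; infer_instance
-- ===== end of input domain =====

-- B replaces A's overwrite-every-iteration accumulator with an early-return scan for the
-- first parseable int plus one separate last-token 'all' check (objective: simpler).


-- ===== PORT A =====
-- A's loop: carries `value`, overwriting it on every failing token; breaks on the first parseable int.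
def getIntTokenLoopA (ts : List String) (allow_all : Bool) (value : Option Int) : Option Int :=
  match ts with
  | [] => value
  | t :: rest =>
    match PySem.Int.ofStr? t with
    | some v => if v < 0 then none else some v
    | none =>
      getIntTokenLoopA rest allow_all
        (if allow_all && (PySem.Str.lower t == "all") then some (-1) else none)

def getIntToken (tokens : List String) (allow_all : Bool) : Option Int :=
  getIntTokenLoopA (PySem.List.slice tokens (some 1) none) allow_all none

-- ===== PORT B =====
-- B's loop: return at the first parseable int (none = continue scanning).
def getIntTokenFindB (ts : List String) : Option (Option Int) :=
  match ts with
  | [] => none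
  | t :: rest =>
    match PySem.Int.ofStr? t with
    | some v => some (if v ≥ 0 then some v else none)
    | none => getIntTokenFindB rest

def getIntToken_alt (tokens : List String) (allow_all : Bool) : Option Int :=
  let rest := PySem.List.slice tokens (some 1) none
  match getIntTokenFindB rest with
  | some r => r
  | none =>
    if allow_all then
      match rest.getLast? with                       -- rest and rest[-1]
      | some t => if PySem.Str.lower t == "all" then some (-1) else none
      | none => none
    else none

-- ===== PRECONDITION & SPEC =====
def Spec_getIntToken (tokens : List String) (allow_all : Bool) (out : Option Int) : Prop := out = getIntToken_alt tokens allow_all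
instance (tokens : List String) (allow_all : Bool) (out : Option Int) : Decidable (Spec_getIntToken tokens allow_all out) := by unfold Spec_getIntToken; infer_instance

-- ===== CLAIM (what is proved, stated in full; the proofs are below) =====
def Claim_equal_getIntToken : Prop := ∀ (tokens : List String) (allow_all : Bool), Dom_getIntToken tokens allow_all → Spec_getIntToken tokens allow_all (getIntToken tokens allow_all)

-- ===== LEMMAS AND PROOFS =====
theorem loopA_eq (ts : List String) (aa : Bool) (v : Option Int) :
    getIntTokenLoopA ts aa v =
      match getIntTokenFindB ts with
      | some r => r
      | none =>
        match ts.getLast? with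
        | some t => if aa && (PySem.Str.lower t == "all") then some (-1) else none
        | none => v := by
  induction ts generalizing v with
  | nil => simp [getIntTokenLoopA, getIntTokenFindB]
  | cons t rest ih =>
    simp only [getIntTokenLoopA, getIntTokenFindB]
    cases h : PySem.Int.ofStr? t with
    | some w =>
      simp only []
      by_cases hw : w < 0 <;> simp [hw, Int.not_lt.mp]
    | none =>
      rw [ih]
      cases hf : getIntTokenFindB rest with
      | some r => simp
      | none =>
        simp only []
        cases rest with
        | nil => simp
        | cons r rs =>
          cases hl : (r :: rs).getLast? with
          | none => simp at hl
          | some t' => simp [List.getLast?_cons_cons, hl]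

theorem getIntToken_spec : Claim_equal_getIntToken := by
  intro tokens aa _
  unfold Spec_getIntToken getIntToken getIntToken_alt
  rw [loopA_eq]
  cases hf : getIntTokenFindB (PySem.List.slice tokens (some 1) none) with
  | some r => simp [hf]
  | none =>
    cases hl : (PySem.List.slice tokens (some 1) none).getLast? with
    | some t => simp only [hf, hl]; cases aa <;> simp
    | none => simp only [hf, hl]; cases aa <;> simp
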